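-- pv_equiv track=rewrite | github.com/Tejesh55/Minimum-Buckets-Required | minimum_buckets_required.py | bucket_create
-- ===== SOURCE A (Python) =====
-- import collections as c
--
-- def bucket_create(a):
--     x=[]
--     count = c.Counter(a)
--     n=len(a)
--     num=0
--     for i in range(n+1):
--         if(num<n):
--             Keymax = max(count, key=count.get)
--             key_val = count[Keymax]
--             if(key_val>=2):
--                 v=key_val+(key_val-1)
--                 x.append(v)
--                 num+=v
--             count[Keymax] -= 1
--     if(num<n):
--         d=n-num
--         for i in range(d):
--             x.append(i)
--     return len(x)
-- ===== SOURCE B (Python) =====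
-- import collections as c
--
-- def bucket_create(a):
--     # Decompose each multiplicity m into its "levels" 2*v-1 (v = m, m-1, ..., 2),
--     # sort all levels descending once, and take them greedily while num < n.
--     n = len(a)
--     contribs = []
--     for cnt in c.Counter(a).values():
--         v = cnt
--         while v >= 2:
--             contribs.append(2 * v - 1)
--             v -= 1
--     contribs.sort(reverse=True)
--     x = 0
--     num = 0
--     for l in contribs:
--         if num < n:
--             x += 1
--             num += l
--     if num < n:
--         x += n - num
--     return x
-- ===== Notes on version B (the rewrite author's own statement) =====
-- stated objective: faster
-- what changed: Instead of re-scanning the whole Counter for its max key on each of the n+1 iterations, B decomposes every multiplicity m into its levels 2v-1 (v=m..2) up front, sorts them once in descending order, and takes them greedily while num < n, which yields exactly the same sequence of additions as A's repeated max-and-decrement.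
import Mathlib
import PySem

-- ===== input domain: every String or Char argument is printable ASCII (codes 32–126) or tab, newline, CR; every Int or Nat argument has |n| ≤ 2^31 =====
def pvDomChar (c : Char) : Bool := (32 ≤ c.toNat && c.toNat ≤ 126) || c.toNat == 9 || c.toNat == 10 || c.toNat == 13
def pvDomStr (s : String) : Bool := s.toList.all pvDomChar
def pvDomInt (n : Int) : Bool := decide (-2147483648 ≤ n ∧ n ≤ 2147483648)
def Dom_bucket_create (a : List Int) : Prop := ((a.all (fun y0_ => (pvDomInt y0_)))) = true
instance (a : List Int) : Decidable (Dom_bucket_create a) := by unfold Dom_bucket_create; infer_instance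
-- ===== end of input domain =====

-- B replaces A's per-iteration scan of the whole Counter for its max key by a one-shot
-- level decomposition of the multiplicities, sorted descending once and consumed greedily.

-- ===== PORT A =====

-- 'max(count, key=count.get)': first key (in dict order) whose value is maximal.
-- The [] case is unreachable: A only calls max on a nonempty Counter (Python would raise ValueError).
def pyMaxKey (d : PySem.Dict Int Int) : Int :=
  match d.keys with
  | [] => 0
  | k :: ks => ks.foldl (fun b k' => if d.getD b 0 < d.getD k' 0 then k' else b) k

-- A's loop body, as a function of the state (x, num, count)
def stepA (n : Int) (st : List Int × Int × PySem.Dict Int Int) : List Int × Int × PySem.Dict Int Int :=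
  let x := st.1; let num := st.2.1; let cnt := st.2.2
  if num < n then
    let keymax := pyMaxKey cnt
    let key_val := cnt.getD keymax 0
    if key_val ≥ 2 then
      let v := key_val + (key_val - 1)
      (x ++ [v], num + v, cnt.insert keymax (cnt.getD keymax 0 - 1))
    else
      (x, num, cnt.insert keymax (cnt.getD keymax 0 - 1))
  else st

def bucket_create (a : List Int) : Int :=
  let count := PySem.Dict.counter a
  let n : Int := a.length
  let st := (PySem.List.pyRange 0 (n + 1) 1).foldl (fun st _ => stepA n st) ([], 0, count)
  let x := if st.2.1 < n then st.1 ++ PySem.List.pyRange 0 (n - st.2.1) 1 else st.1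
  (x.length : Int)

-- ===== PORT B =====

-- the inner 'while v >= 2: contribs.append(2*v-1); v -= 1' of Source B
def contribFrom (v : Int) : List Int :=
  if h : 2 ≤ v then (2 * v - 1) :: contribFrom (v - 1) else []
termination_by v.toNat
decreasing_by omega

def bucket_create_alt (a : List Int) : Int :=
  let n : Int := a.length
  let contribs := (PySem.Dict.counter a).values.foldl (fun acc cnt => acc ++ contribFrom cnt) []
  let contribs := PySem.List.sorted contribs (fun z => z) true
  let s := contribs.foldl (fun (s : Int × Int) l => if s.2 < n then (s.1 + 1, s.2 + l) else s) (0, 0)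
  if s.2 < n then s.1 + (n - s.2) else s.1

-- ===== PRECONDITION & SPEC =====
def Spec_bucket_create (a : List Int) (out : Int) : Prop := out = bucket_create_alt a
instance (a : List Int) (out : Int) : Decidable (Spec_bucket_create a out) := by unfold Spec_bucket_create; infer_instance

-- ===== CLAIM (what is proved, stated in full; the proofs are below) =====
def Claim_equal_bucket_create : Prop := ∀ (a : List Int), Dom_bucket_create a → Spec_bucket_create a (bucket_create a)

-- ===== LEMMAS AND PROOFS =====

-- B's greedy fold
def greedyB (n : Int) (L : List Int) (s : Int × Int) : Int × Int :=
  L.foldl (fun s l => if s.2 < n then (s.1 + 1, s.2 + l) else s) s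

-- the common value both programs compute from a mid-loop state
def Gfun (n x num : Int) (V : List Int) : Int :=
  let s := greedyB n (PySem.List.sorted (V.flatMap contribFrom) (fun z => z) true) (x, num)
  if s.2 < n then s.1 + (n - s.2) else s.1

-- A's final answer from the loop's end state
def finalizeA (n : Int) (st : List Int × Int × PySem.Dict Int Int) : Int :=
  if st.2.1 < n then (st.1.length : Int) + (n - st.2.1) else (st.1.length : Int)

lemma foldl_const {α β : Type} (l : List α) (f : β → β) (init : β) :
    l.foldl (fun s _ => f s) init = f^[l.length] init := by
  induction l generalizing init with
  | nil => rfl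
  | cons a t ih => simpa [List.foldl_cons, Function.iterate_succ_apply] using ih (f init)

lemma greedy_skip (n : Int) (L : List Int) (x num : Int) (h : ¬ num < n) :
    greedyB n L (x, num) = (x, num) := by
  induction L with
  | nil => rfl
  | cons a t ih => simpa [greedyB, List.foldl_cons, if_neg h] using ih

lemma contribFrom_eq_nil {v : Int} (h : v ≤ 1) : contribFrom v = [] := by
  rw [contribFrom]; simp [show ¬ (2 ≤ v) by omega]

lemma contribFrom_eq_cons {v : Int} (h : 2 ≤ v) :
    contribFrom v = (2 * v - 1) :: contribFrom (v - 1) := by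
  rw [contribFrom]; simp [h]

lemma mem_contribFrom (v e : Int) (he : e ∈ contribFrom v) : e ≤ 2 * v - 1 := by
  by_cases h : 2 ≤ v
  · rw [contribFrom_eq_cons h] at he
    rcases List.mem_cons.1 he with h1 | h1
    · omega
    · have := mem_contribFrom (v - 1) e h1; omega
  · rw [contribFrom_eq_nil (by omega)] at he; simp at he
termination_by v.toNat
decreasing_by omega

lemma length_contribFrom (v : Int) (h : 1 ≤ v) : ((contribFrom v).length : Int) = v - 1 := by
  by_cases h2 : 2 ≤ v
  · rw [contribFrom_eq_cons h2, List.length_cons]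
    have := length_contribFrom (v - 1) (by omega)
    push_cast
    omega
  · rw [contribFrom_eq_nil (by omega)]
    simp
    omega
termination_by v.toNat
decreasing_by omega

-- a descending-sorted rearrangement of L is sorted(L, reverse=True) (key = identity)
lemma sorted_rev_unique (L M : List Int) (hperm : M.Perm L)
    (hsort : M.Pairwise (fun a b => b ≤ a)) :
    PySem.List.sorted L (fun z => z) true = M := by
  exact List.Perm.eq_of_pairwise (fun a b _ _ h1 h2 => le_antisymm h2 h1)
    (by simpa using PySem.List.sorted_pairwise_rev L (fun z => z)) hsort
    ((PySem.List.sorted_perm L (fun z => z) true).trans hperm.symm)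

lemma pyMaxKey_spec (d : PySem.Dict Int Int) (hne : d.keys ≠ []) :
    pyMaxKey d ∈ d.keys ∧ ∀ k' ∈ d.keys, d.getD k' 0 ≤ d.getD (pyMaxKey d) 0 := by
  rcases hk : d.keys with _ | ⟨k, ks⟩
  · exact absurd hk hne
  have main : ∀ (ks : List Int) (b : Int),
      (ks.foldl (fun b k' => if d.getD b 0 < d.getD k' 0 then k' else b) b = b ∨
       ks.foldl (fun b k' => if d.getD b 0 < d.getD k' 0 then k' else b) b ∈ ks) ∧
      d.getD b 0 ≤ d.getD (ks.foldl (fun b k' => if d.getD b 0 < d.getD k' 0 then k' else b) b) 0 ∧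
      ∀ k' ∈ ks, d.getD k' 0 ≤ d.getD (ks.foldl (fun b k' => if d.getD b 0 < d.getD k' 0 then k' else b) b) 0 := by
    intro ks
    induction ks with
    | nil => intro b; simp
    | cons a t ih =>
      intro b
      simp only [List.foldl_cons]
      by_cases hab : d.getD b 0 < d.getD a 0
      · rw [if_pos hab]
        rcases ih a with ⟨hmem, hb, hall⟩
        refine ⟨?_, by omega, ?_⟩
        · rcases hmem with h | h
          · right; rw [h]; exact List.mem_cons_self
          · right; exact List.mem_cons_of_mem _ h
        · intro k' hk'
          rcases List.mem_cons.1 hk' with h | h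
          · subst h; exact hb
          · exact hall _ h
      · rw [if_neg hab]
        rcases ih b with ⟨hmem, hb, hall⟩
        refine ⟨?_, hb, ?_⟩
        · rcases hmem with h | h
          · left; exact h
          · right; exact List.mem_cons_of_mem _ h
        · intro k' hk'
          rcases List.mem_cons.1 hk' with h | h
          · subst h; omega
          · exact hall _ h
  have hpm : pyMaxKey d = ks.foldl (fun b k' => if d.getD b 0 < d.getD k' 0 then k' else b) k := by
    unfold pyMaxKey; rw [hk]
  rcases main ks k with ⟨hmem, hb, hall⟩
  rw [hpm]
  constructor
  · rcases hmem with h | h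
    · rw [h]; exact List.mem_cons_self
    · exact List.mem_cons_of_mem _ h
  · intro k' hk'
    rcases List.mem_cons.1 hk' with h | h
    · subst h; exact hb
    · exact hall _ h

-- decomposition of a dict's items at a key
lemma items_split (d : PySem.Dict Int Int) (hnd : d.keys.Nodup) {km : Int}
    (hmem : km ∈ d.keys) :
    ∃ P Q, d.items = P ++ (km, d.getD km 0) :: Q ∧
      (∀ p ∈ P, p.1 ≠ km) ∧ (∀ p ∈ Q, p.1 ≠ km) := by
  have hex : ∃ w, (km, w) ∈ d.items := by
    have : km ∈ d.items.map Prod.fst := hmem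
    rcases List.mem_map.1 this with ⟨p, hp, hfst⟩
    exact ⟨p.2, by rwa [show (km, p.2) = p from Prod.ext hfst.symm rfl]⟩
  rcases hex with ⟨w, hw⟩
  have hgd : d.getD km 0 = w := PySem.Dict.getD_of_mem_items d hw hnd 0
  rcases List.append_of_mem hw with ⟨P, Q, hPQ⟩
  have hndPQ : ((P ++ (km, w) :: Q).map Prod.fst).Nodup := by rw [← hPQ]; exact hnd
  simp only [List.map_append, List.map_cons, List.nodup_append, List.nodup_cons] at hndPQ
  refine ⟨P, Q, by rw [hgd, hPQ], ?_, ?_⟩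
  · intro p hp hfst
    exact hndPQ.2.2 p.1 (List.mem_map_of_mem hp) km List.mem_cons_self hfst
  · intro p hp hfst
    exact hndPQ.2.1.1 (by rw [← hfst]; exact List.mem_map_of_mem hp)

lemma map_snd_fix (km w : Int) (l : List (Int × Int)) (hl : ∀ p ∈ l, p.1 ≠ km) :
    l.map (fun p => if p.1 == km then (km, w) else p) = l := by
  induction l with
  | nil => rfl
  | cons a t ih =>
    rw [List.map_cons, if_neg (by simpa using hl a List.mem_cons_self),
      ih (fun p hp => hl p (List.mem_cons_of_mem _ hp))]

lemma main_lemma (n : Int) :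
    ∀ (j : ℕ) (x : List Int) (num : Int) (d : PySem.Dict Int Int),
      d.keys.Nodup → d.keys ≠ [] →
      (d.values.flatMap contribFrom).length ≤ j →
      finalizeA n ((stepA n)^[j] (x, num, d)) = Gfun n x.length num d.values := by
  intro j
  induction j with
  | zero =>
    intro x num d _ _ hlen
    have hnil : d.values.flatMap contribFrom = [] := List.length_eq_zero_iff.1 (Nat.le_zero.1 hlen)
    simp only [Function.iterate_zero, id_eq, Gfun, hnil]
    rw [show PySem.List.sorted ([] : List Int) (fun z => z) true = [] from rfl]
    simp [finalizeA, greedyB]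
  | succ j ih =>
    intro x num d hnd hne hlen
    rw [Function.iterate_succ_apply]
    by_cases hnum : num < n
    case neg =>
      have hfix : stepA n (x, num, d) = (x, num, d) := by simp [stepA, if_neg hnum]
      rw [hfix, Function.iterate_fixed hfix]
      simp [finalizeA, Gfun, greedy_skip n _ _ _ hnum, if_neg hnum]
    case pos =>
      obtain ⟨km, hpm⟩ : ∃ km, pyMaxKey d = km := ⟨_, rfl⟩
      obtain ⟨m, hm⟩ : ∃ m, d.getD km 0 = m := ⟨_, rfl⟩
      obtain ⟨hkmem, hkmax⟩ := pyMaxKey_spec d hne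
      rw [hpm] at hkmem hkmax
      rw [hm] at hkmax
      rcases items_split d hnd hkmem with ⟨P, Q, hitems, hP, hQ⟩
      rw [hm] at hitems
      have hcont : d.contains km = true := (PySem.Dict.contains_iff_mem_keys d km).2 hkmem
      have hitems' : (d.insert km (m - 1)).items = P ++ (km, m - 1) :: Q := by
        rw [PySem.Dict.items_insert, if_pos hcont, hitems]
        rw [List.map_append, List.map_cons, map_snd_fix km (m - 1) P hP,
          map_snd_fix km (m - 1) Q hQ, if_pos (by simp)]
      have hkeys' : (d.insert km (m - 1)).keys = d.keys := by
        show (d.insert km (m - 1)).items.map Prod.fst = d.items.map Prod.fst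
        rw [hitems, hitems']; simp
      have hV : d.values = P.map Prod.snd ++ m :: Q.map Prod.snd := by
        show d.items.map Prod.snd = _
        rw [hitems]; simp
      have hV' : (d.insert km (m - 1)).values = P.map Prod.snd ++ (m - 1) :: Q.map Prod.snd := by
        show (d.insert km (m - 1)).items.map Prod.snd = _
        rw [hitems']; simp
      -- every value of d is ≤ m
      have hvle : ∀ v ∈ d.values, v ≤ m := by
        intro v hv
        rcases List.mem_map.1 hv with ⟨p, hp, hsnd⟩
        have hgdp : d.getD p.1 0 = v := by
          rw [← hsnd]
          exact PySem.Dict.getD_of_mem_items d (by rwa [show (p.1, p.2) = p from rfl]) hnd 0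
        rw [← hgdp]
        exact hkmax p.1 (List.mem_map_of_mem hp)
      have hvle' : ∀ v ∈ (d.insert km (m - 1)).values, v ≤ m := by
        intro v hv
        rw [hV'] at hv
        rw [hV] at hvle
        simp only [List.mem_append, List.mem_cons] at hv hvle ⊢
        rcases hv with h | h | h
        · exact hvle v (Or.inl h)
        · omega
        · exact hvle v (Or.inr (Or.inr h))
      by_cases hm2 : m ≥ 2
      case pos =>
        have hstep : stepA n (x, num, d) =
            (x ++ [m + (m - 1)], num + (m + (m - 1)), d.insert km (m - 1)) := by
          simp only [stepA, hpm, hm]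
          rw [if_pos hnum, if_pos hm2]
        have hflat : d.values.flatMap contribFrom =
            (P.map Prod.snd).flatMap contribFrom ++
              ((2 * m - 1) :: contribFrom (m - 1)) ++ (Q.map Prod.snd).flatMap contribFrom := by
          rw [hV]
          simp [List.flatMap_append, List.flatMap_cons, contribFrom_eq_cons hm2]
        have hflat' : (d.insert km (m - 1)).values.flatMap contribFrom =
            (P.map Prod.snd).flatMap contribFrom ++
              contribFrom (m - 1) ++ (Q.map Prod.snd).flatMap contribFrom := by
          rw [hV']
          simp [List.flatMap_append, List.flatMap_cons]
        have hlen' : ((d.insert km (m - 1)).values.flatMap contribFrom).length ≤ j := by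
          rw [hflat] at hlen; rw [hflat']
          simp only [List.length_append, List.length_cons] at hlen ⊢
          omega
        have hbound : ∀ e ∈ (d.insert km (m - 1)).values.flatMap contribFrom, e ≤ 2 * m - 1 := by
          intro e he
          rcases List.mem_flatMap.1 he with ⟨v, hv, hev⟩
          have h1 := mem_contribFrom v e hev
          have h2 := hvle' v hv
          omega
        have hsorted : PySem.List.sorted (d.values.flatMap contribFrom) (fun z => z) true =
            (2 * m - 1) ::
              PySem.List.sorted ((d.insert km (m - 1)).values.flatMap contribFrom) (fun z => z) true := by
          apply sorted_rev_unique
          · have hp1 : (PySem.List.sorted ((d.insert km (m - 1)).values.flatMap contribFrom) (fun z => z) true).Perm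
                ((d.insert km (m - 1)).values.flatMap contribFrom) := PySem.List.sorted_perm _ _ _
            refine (List.Perm.cons (2 * m - 1) hp1).trans ?_
            rw [hflat, hflat', List.append_assoc, List.append_assoc]
            exact List.perm_middle.symm
          · have hpw := PySem.List.sorted_pairwise_rev
              ((d.insert km (m - 1)).values.flatMap contribFrom) (fun z : Int => z)
            refine List.pairwise_cons.2 ⟨?_, by simpa using hpw⟩
            intro e he
            exact hbound e ((PySem.List.mem_sorted _ _ _ _).1 he)
        have hgoal := ih (x ++ [m + (m - 1)]) (num + (m + (m - 1))) (d.insert km (m - 1))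
          (by rw [hkeys']; exact hnd) (by rw [hkeys']; exact hne) hlen'
        rw [hstep, hgoal]
        simp only [Gfun, hsorted, greedyB, List.foldl_cons, if_pos hnum]
        rw [show (x ++ [m + (m - 1)]).length = x.length + 1 by simp]
        rw [show (2 * m - 1) = (m + (m - 1)) by ring]
        push_cast
        ring_nf
      case neg =>
        have hstep : stepA n (x, num, d) = (x, num, d.insert km (m - 1)) := by
          simp only [stepA, hpm, hm]
          rw [if_pos hnum, if_neg hm2]
        have hnil : d.values.flatMap contribFrom = [] := by
          apply List.flatMap_eq_nil_iff.2
          intro v hv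
          exact contribFrom_eq_nil (by have := hvle v hv; omega)
        have hnil' : (d.insert km (m - 1)).values.flatMap contribFrom = [] := by
          apply List.flatMap_eq_nil_iff.2
          intro v hv
          exact contribFrom_eq_nil (by have := hvle' v hv; omega)
        have hgoal := ih x num (d.insert km (m - 1)) (by rw [hkeys']; exact hnd)
          (by rw [hkeys']; exact hne) (by rw [hnil']; simp)
        rw [hstep, hgoal]
        simp only [Gfun, hnil, hnil']

-- sum of the Counter's values is the length of the list
lemma sum_counter_values (a : List Int) :
    ((PySem.Set.ofList a).map (fun k => List.count k a)).sum = a.length := by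
  have hperm : (PySem.Set.ofList a).Perm a.dedup :=
    (List.perm_ext_iff_of_nodup (PySem.Set.nodup_ofList a) (List.nodup_dedup a)).2
      (fun x => by rw [PySem.Set.mem_ofList, List.mem_dedup])
  rw [(hperm.map (fun k => List.count k a)).sum_eq]
  exact List.sum_map_count_dedup_eq_length a

-- total number of contributions is at most n
lemma flat_len_le (a : List Int) :
    ((((PySem.Dict.counter a).values.flatMap contribFrom)).length : Int) ≤ (a.length : Int) := by
  have hvals : (PySem.Dict.counter a).values
      = (PySem.Set.ofList a).map (fun k => ((List.count k a : Nat) : Int)) := by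
    show (PySem.Dict.counter a).items.map Prod.snd = _
    rw [PySem.Dict.items_counter, List.map_map]
    rfl
  rw [hvals, List.length_flatMap, List.map_map, Nat.cast_list_sum, List.map_map]
  have hb : ∀ k ∈ PySem.Set.ofList a,
      (Nat.cast ∘ (fun k => (contribFrom ((List.count k a : Nat) : Int)).length)) k
        ≤ (fun k => ((List.count k a : Nat) : Int)) k := by
    intro k _
    simp only [Function.comp_apply]
    by_cases h1 : (1 : Int) ≤ ((List.count k a : Nat) : Int)
    · rw [length_contribFrom _ h1]; omega
    · rw [contribFrom_eq_nil (by omega)]; simp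
  calc ((PySem.Set.ofList a).map
        (Nat.cast ∘ (fun k => (contribFrom ((List.count k a : Nat) : Int)).length))).sum
      ≤ ((PySem.Set.ofList a).map (fun k => ((List.count k a : Nat) : Int))).sum :=
        List.sum_le_sum hb
    _ = (((PySem.Set.ofList a).map (fun k => List.count k a)).map Nat.cast).sum := by
        rw [List.map_map]; rfl
    _ = (a.length : Int) := by rw [← Nat.cast_list_sum, sum_counter_values a]

-- A's final adjustment equals finalizeA
lemma finalize_eq (n : Int) (st : List Int × Int × PySem.Dict Int Int) :
    ((if st.2.1 < n then st.1 ++ PySem.List.pyRange 0 (n - st.2.1) 1 else st.1).length : Int)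
      = finalizeA n st := by
  unfold finalizeA
  split_ifs with h
  · rw [List.length_append, PySem.List.length_pyRange_one]
    push_cast
    omega
  · rfl

-- ===== VERDICT (by name: the statement is the Claim_ definition above) =====
theorem bucket_create_spec : Claim_equal_bucket_create := by
  intro a _
  show bucket_create a = bucket_create_alt a
  have hB : bucket_create_alt a = Gfun (a.length : Int) 0 0 (PySem.Dict.counter a).values := by
    simp only [bucket_create_alt, Gfun, greedyB]
    rw [PySem.List.foldl_append_eq_flatMap]
    simp only [List.nil_append]
  rcases a with _ | ⟨hd, tl⟩
  · rfl
  · have hne : (PySem.Dict.counter (hd :: tl)).keys ≠ [] := by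
      rw [PySem.Dict.keys_counter]
      exact List.ne_nil_of_mem ((PySem.Set.mem_ofList _ _).2 List.mem_cons_self)
    have hlen : ((PySem.Dict.counter (hd :: tl)).values.flatMap contribFrom).length
        ≤ (((hd :: tl).length : Int) + 1 - 0).toNat := by
      have := flat_len_le (hd :: tl)
      omega
    have hmain := main_lemma ((hd :: tl).length : Int)
      ((((hd :: tl).length : Int) + 1 - 0).toNat) [] 0 (PySem.Dict.counter (hd :: tl))
      (PySem.Dict.nodup_keys_counter (hd :: tl)) hne hlen
    simp only [bucket_create]
    rw [foldl_const _ (stepA ((hd :: tl).length : Int))]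
    rw [finalize_eq, PySem.List.length_pyRange_one, hmain, hB]
    norm_num
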